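-- pv_equiv track=rewrite | github.com/danielgonzagat/act | scripts/smoke_mine_promote_pcc_v74.py | _find_subpath_start
-- ===== SOURCE A (Python) =====
-- from typing import Any, Dict, List, Optional, Sequence, Tuple
--
-- def _find_subpath_start(path: Sequence[str], subpath: Sequence[str]) -> Optional[int]:
--     p = [str(x) for x in path]
--     sp = [str(x) for x in subpath]
--     if not sp or len(sp) > len(p):
--         return None
--     for i in range(0, len(p) - len(sp) + 1):
--         if p[i : i + len(sp)] == sp:
--             return int(i)
--     return None
-- ===== SOURCE B (Python) =====
-- from typing import Optional, Sequence
--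
-- def _find_subpath_start(path: Sequence[str], subpath: Sequence[str]) -> Optional[int]:
--     p = [str(x) for x in path]
--     sp = [str(x) for x in subpath]
--     m = len(sp)
--     if m == 0 or m > len(p):
--         return None
--     # Knuth-Morris-Pratt: failure table, then a single left-to-right pass over p.
--     fail = [0] * m
--     k = 0
--     for j in range(1, m):
--         while k > 0 and sp[j] != sp[k]:
--             k = fail[k - 1]
--         if sp[j] == sp[k]:
--             k += 1
--         fail[j] = k
--     q = 0
--     for i, c in enumerate(p):
--         while q > 0 and c != sp[q]:
--             q = fail[q - 1]
--         if c == sp[q]: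
--             q += 1
--         if q == m:
--             return i - m + 1
--     return None
-- ===== Notes on version B (the rewrite author's own statement) =====
-- stated objective: alternative
-- what changed: Replaced the naive scan that slices and compares the window at every start index with Knuth-Morris-Pratt: a failure table over the pattern plus a single left-to-right pass over the path.
import Mathlib
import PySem

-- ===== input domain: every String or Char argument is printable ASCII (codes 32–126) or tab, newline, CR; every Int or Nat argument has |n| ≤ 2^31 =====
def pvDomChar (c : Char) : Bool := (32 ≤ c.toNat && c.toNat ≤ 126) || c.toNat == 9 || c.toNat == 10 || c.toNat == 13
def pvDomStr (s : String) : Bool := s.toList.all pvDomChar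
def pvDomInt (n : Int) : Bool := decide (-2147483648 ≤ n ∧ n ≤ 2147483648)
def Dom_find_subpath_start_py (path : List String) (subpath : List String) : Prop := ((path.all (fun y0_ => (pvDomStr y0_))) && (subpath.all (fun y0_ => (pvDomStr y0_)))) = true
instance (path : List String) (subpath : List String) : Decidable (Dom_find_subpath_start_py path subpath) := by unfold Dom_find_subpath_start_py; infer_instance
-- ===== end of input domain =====

-- B replaces A's naive scan (every start index compared by slicing) with Knuth–Morris–Pratt
-- (failure table + one left-to-right pass); objective: alternative algorithm.

-- ===== PORT A =====
-- the 'for i in range(...)' loop with its early 'return int(i)'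
def pvALoop (p sp : List String) : List Int → Option Int
  | [] => none
  | i :: rest =>
    if PySem.List.slice p (some i) (some (i + (sp.length : Int))) = sp then some i
    else pvALoop p sp rest

def find_subpath_start_py (path : List String) (subpath : List String) : Option Int :=
  -- str(x) is the identity on str, so the two comprehensions copy the lists
  let p : List String := path.map (fun x => x)
  let sp : List String := subpath.map (fun x => x)
  if sp = [] ∨ sp.length > p.length then none
  else pvALoop p sp (PySem.List.pyRange 0 ((p.length : Int) - (sp.length : Int) + 1) 1)

-- ===== PORT B =====
-- the shared 'while k > 0 and c != sp[k]: k = fail[k-1]' loop; fuel = initial k bounds the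
-- iteration count (k strictly decreases on the real table), a pure totality guard
def pvShift (sp : List String) (fail : List Nat) (c : String) : Nat → Nat → Nat
  | 0, k => k
  | fuel + 1, k =>
    if 0 < k ∧ c ≠ sp.getD k "" then pvShift sp fail c fuel (fail.getD (k - 1) 0) else k

-- the shared 'while …; if c == sp[k]: k += 1' step of both of B's loops
def pvStep (sp : List String) (fail : List Nat) (c : String) (k : Nat) : Nat :=
  let k2 := pvShift sp fail c k k
  if c = sp.getD k2 "" then k2 + 1 else k2

-- 'for j in range(1, m): …; fail[j] = k'  (the table is filled left to right, so it is built by appending)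
def pvFailLoop (sp : List String) : List Int → List Nat → Nat → List Nat
  | [], fail, _ => fail
  | j :: rest, fail, k =>
    let k' := pvStep sp fail (PySem.List.pyGetD sp j "") k
    pvFailLoop sp rest (fail ++ [k']) k'

-- 'for i, c in enumerate(p): …; if q == m: return i - m + 1'
def pvSearch (sp : List String) (fail : List Nat) (m : Nat) : List String → Int → Nat → Option Int
  | [], _, _ => none
  | c :: rest, i, q =>
    let q' := pvStep sp fail c q
    if q' = m then some (i - (m : Int) + 1) else pvSearch sp fail m rest (i + 1) q'

def find_subpath_start_py_alt (path : List String) (subpath : List String) : Option Int :=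
  let p : List String := path.map (fun x => x)
  let sp : List String := subpath.map (fun x => x)
  let m := sp.length
  if m = 0 ∨ m > p.length then none
  else
    let fail := pvFailLoop sp (PySem.List.pyRange 1 (m : Int) 1) [0] 0
    pvSearch sp fail m p 0 0

-- ===== PRECONDITION & SPEC =====
def Spec_find_subpath_start_py (path : List String) (subpath : List String) (out : Option Int) : Prop := out = find_subpath_start_py_alt path subpath
instance (path : List String) (subpath : List String) (out : Option Int) : Decidable (Spec_find_subpath_start_py path subpath out) := by unfold Spec_find_subpath_start_py; infer_instance

-- ===== CLAIM (what is proved, stated in full; the proofs are below) =====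
def Claim_equal_find_subpath_start_py : Prop := ∀ (path : List String) (subpath : List String), Dom_find_subpath_start_py path subpath → Spec_find_subpath_start_py path subpath (find_subpath_start_py path subpath)

-- ===== LEMMAS AND PROOFS =====

-- `pvBorder sp j` = length of the longest proper border of `sp.take j` (the failure-table spec)
def pvBorder (sp : List String) (j : Nat) : Nat :=
  Nat.findGreatest (fun l => sp.take l <:+ sp.take j) (j - 1)

-- `pvBest sp t` = length of the longest prefix of sp (≤ |sp|) that is a suffix of t (the search-state spec)
def pvBest (sp t : List String) : Nat :=
  Nat.findGreatest (fun l => sp.take l <:+ t) sp.length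

-- the set of lengths the step loop starting at k₀ is able to reach and report
def pvStepSet (sp t : List String) (c : String) (k₀ l : Nat) : Prop :=
  l ≤ sp.length ∧ sp.take l <:+ t ++ [c] ∧ (l = 0 ∨ (l - 1 ≤ k₀ ∧ sp.take (l - 1) <:+ sp.take k₀))

-- reference first-match scans used to bridge the two ports
def pvEndScan (sp : List String) : List String → List String → Option Nat
  | _, [] => none
  | t, c :: rest =>
    if sp <:+ t ++ [c] then some (t.length + 1) else pvEndScan sp (t ++ [c]) rest

theorem snoc_suffix_snoc (a b : List String) (x y : String) :
    (a ++ [x]) <:+ (b ++ [y]) ↔ x = y ∧ a <:+ b := by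
  rw [← List.reverse_prefix]; simp [List.cons_prefix_cons]

theorem take_snoc (sp : List String) (l : Nat) (h : l < sp.length) :
    sp.take (l + 1) = sp.take l ++ [sp.getD l ""] := by
  rw [List.take_add_one]; simp [List.getElem?_eq_getElem h, List.getD_eq_getElem?_getD]

theorem find?_congr' (p q : Nat → Bool) (l : List Nat) (h : ∀ a ∈ l, p a = q a) :
    l.find? p = l.find? q := by
  induction l with
  | nil => rfl
  | cons a l ih =>
    simp only [List.find?]; rw [h a (by simp)]
    split
    · rfl
    · exact ih fun x hx => h x (by simp [hx])

-- border lemmas ---------------------------------------------------------------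

theorem pvBorder_le (sp : List String) (j : Nat) : pvBorder sp j ≤ j - 1 :=
  Nat.findGreatest_le _

theorem pvBorder_suffix (sp : List String) (j : Nat) :
    sp.take (pvBorder sp j) <:+ sp.take j := by
  have h := Nat.findGreatest_spec (P := fun l => sp.take l <:+ sp.take j) (Nat.zero_le (j-1))
    (by simp)
  exact h

theorem le_pvBorder (sp : List String) {j l : Nat} (hl : l ≤ j - 1)
    (h : sp.take l <:+ sp.take j) : l ≤ pvBorder sp j :=
  Nat.le_findGreatest hl h

theorem pvBest_le (sp t : List String) : pvBest sp t ≤ sp.length :=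
  Nat.findGreatest_le _

theorem pvBest_suffix (sp t : List String) : sp.take (pvBest sp t) <:+ t := by
  have h := Nat.findGreatest_spec (P := fun l => sp.take l <:+ t) (Nat.zero_le sp.length)
    (by simp)
  exact h

theorem le_pvBest (sp t : List String) {l : Nat} (hl : l ≤ sp.length)
    (h : sp.take l <:+ t) : l ≤ pvBest sp t :=
  Nat.le_findGreatest hl h

theorem pvBest_nil (sp : List String) : pvBest sp [] = 0 := by
  unfold pvBest
  rw [Nat.findGreatest_eq_zero_iff]
  intro n hn hnb h
  rw [List.suffix_nil, List.take_eq_nil_iff] at h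
  rcases h with h | h
  · omega
  · subst h; simp at hnb; omega

-- core step lemma -------------------------------------------------------------

-- the exit state of the shift loop, as an invariant-preserving descent
theorem pvShift_inv (sp : List String) (fail : List Nat) (t : List String) (c : String)
    (k₀ : Nat) (hk₀m : k₀ < sp.length)
    (hFail : ∀ j, 1 ≤ j → j ≤ k₀ → fail.getD (j - 1) 0 = pvBorder sp j) :
    ∀ fuel k, k ≤ fuel → k ≤ k₀ → sp.take k <:+ t → sp.take k <:+ sp.take k₀ →
    (∀ l, pvStepSet sp t c k₀ l → 0 < l → l - 1 ≤ k ∧ sp.take (l - 1) <:+ sp.take k) →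
    (k ≤ sp.length →
      (pvShift sp fail c fuel k ≤ k₀ ∧ sp.take (pvShift sp fail c fuel k) <:+ t ∧
      sp.take (pvShift sp fail c fuel k) <:+ sp.take k₀ ∧
      (∀ l, pvStepSet sp t c k₀ l → 0 < l →
        l - 1 ≤ pvShift sp fail c fuel k ∧ sp.take (l - 1) <:+ sp.take (pvShift sp fail c fuel k)) ∧
      (pvShift sp fail c fuel k = 0 ∨ c = sp.getD (pvShift sp fail c fuel k) ""))) := by
  intro fuel
  induction fuel with
  | zero =>
    intro k hf hk0 ht htk hdom _
    interval_cases k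
    exact ⟨Nat.zero_le _, ht, htk, hdom, Or.inl rfl⟩
  | succ fuel ih =>
    intro k hf hk0 ht htk hdom hkm
    by_cases hcond : 0 < k ∧ c ≠ sp.getD k ""
    · have hk1 : 1 ≤ k := hcond.1
      have hfk : fail.getD (k - 1) 0 = pvBorder sp k := hFail k hk1 hk0
      have hble : pvBorder sp k ≤ k - 1 := pvBorder_le sp k
      have hbsf : sp.take (pvBorder sp k) <:+ sp.take k := pvBorder_suffix sp k
      have hstep : pvShift sp fail c (fuel + 1) k = pvShift sp fail c fuel (fail.getD (k - 1) 0) := by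
        simp only [pvShift, if_pos hcond]
      rw [hstep, hfk]
      refine ih (pvBorder sp k) (by omega) (by omega) (hbsf.trans ht) (hbsf.trans htk) ?_ (by omega)
      intro l hl hl0
      obtain ⟨h1, h2⟩ := hdom l hl hl0
      have hlm : l ≤ sp.length := hl.1
      have hlm1 : l - 1 < sp.length := by omega
      have hsnoc : sp.take l = sp.take (l - 1) ++ [sp.getD (l - 1) ""] := by
        have := take_snoc sp (l - 1) hlm1
        rw [show l - 1 + 1 = l by omega] at this
        exact this
      have hne : l - 1 ≠ k := by
        intro he
        have hsfx : sp.take l <:+ t ++ [c] := hl.2.1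
        rw [hsnoc] at hsfx
        have := (snoc_suffix_snoc _ _ _ _).mp hsfx
        exact hcond.2 (he ▸ this.1.symm)
      have hlt : l - 1 < k := lt_of_le_of_ne h1 hne
      have hleb : l - 1 ≤ pvBorder sp k := le_pvBorder sp (by omega) h2
      refine ⟨hleb, ?_⟩
      apply List.suffix_of_suffix_length_le h2 hbsf
      rw [List.length_take, List.length_take]
      omega
    · have hstep : pvShift sp fail c (fuel + 1) k = k := by
        simp only [pvShift, if_neg hcond]
      rw [hstep]
      refine ⟨hk0, ht, htk, hdom, ?_⟩
      by_cases hk : k = 0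
      · exact Or.inl hk
      · right
        by_contra hc
        exact hcond ⟨by omega, hc⟩

-- the step computes the maximum of the reachable set
theorem pvStep_max (sp : List String) (fail : List Nat) (t : List String) (c : String)
    (k₀ : Nat) (hk₀m : k₀ < sp.length)
    (hFail : ∀ j, 1 ≤ j → j ≤ k₀ → fail.getD (j - 1) 0 = pvBorder sp j)
    (hk₀t : sp.take k₀ <:+ t) :
    pvStepSet sp t c k₀ (pvStep sp fail c k₀) ∧
      ∀ l, pvStepSet sp t c k₀ l → l ≤ pvStep sp fail c k₀ := by
  have hdom0 : ∀ l, pvStepSet sp t c k₀ l → 0 < l → l - 1 ≤ k₀ ∧ sp.take (l - 1) <:+ sp.take k₀ := by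
    intro l hl hl0
    rcases hl.2.2 with h | h
    · omega
    · exact h
  have hsh := pvShift_inv sp fail t c k₀ hk₀m hFail k₀ k₀ le_rfl le_rfl hk₀t List.suffix_rfl
    hdom0 (by omega)
  set k2 := pvShift sp fail c k₀ k₀ with hk2def
  obtain ⟨hk2k0, hk2t, hk2tk, hdom2, hexit⟩ := hsh
  have hk2m : k2 < sp.length := by omega
  unfold pvStep
  rw [← hk2def]
  by_cases hc : c = sp.getD k2 ""
  · rw [if_pos hc]
    have hsnoc : sp.take (k2 + 1) = sp.take k2 ++ [sp.getD k2 ""] := take_snoc sp k2 hk2m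
    constructor
    · refine ⟨by omega, ?_, Or.inr ⟨by omega, hk2tk⟩⟩
      rw [hsnoc, ← hc]
      exact (snoc_suffix_snoc _ _ _ _).mpr ⟨rfl, hk2t⟩
    · intro l hl
      rcases Nat.eq_zero_or_pos l with h | h
      · omega
      · have := (hdom2 l hl h).1
        omega
  · rw [if_neg hc]
    have hk20 : k2 = 0 := by
      rcases hexit with h | h
      · exact h
      · exact absurd h hc
    constructor
    · exact ⟨by omega, by rw [hk20]; simp, Or.inl hk20⟩
    · intro l hl
      rcases Nat.eq_zero_or_pos l with h | h
      · omega
      · exfalso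
        have hd := hdom2 l hl h
        have hl1 : l = 1 := by omega
        have hsfx : sp.take l <:+ t ++ [c] := hl.2.1
        have h0m : 0 < sp.length := by omega
        have h1 : sp.take 1 = [] ++ [sp.getD 0 ""] := by
          have := take_snoc sp 0 h0m
          simpa using this
        rw [hl1, h1] at hsfx
        have := (snoc_suffix_snoc _ _ _ _).mp hsfx
        exact hc (hk20 ▸ this.1.symm)

-- helper: a positive element of the extended-suffix set drops back into the state set
theorem pvStepSet_intro (sp t : List String) (c : String) (k₀ l : Nat)
    (hk₀m : k₀ ≤ sp.length) (hk₀t : sp.take k₀ <:+ t)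
    (hk₀max : ∀ l', l' ≤ sp.length → sp.take l' <:+ t → l' + 1 = l → l' ≤ k₀)
    (hlm : l ≤ sp.length) (hsfx : sp.take l <:+ t ++ [c]) :
    pvStepSet sp t c k₀ l := by
  refine ⟨hlm, hsfx, ?_⟩
  rcases Nat.eq_zero_or_pos l with h | h
  · exact Or.inl h
  · right
    have hlm1 : l - 1 < sp.length := by omega
    have hsnoc : sp.take l = sp.take (l - 1) ++ [sp.getD (l - 1) ""] := by
      have := take_snoc sp (l - 1) hlm1
      rw [show l - 1 + 1 = l by omega] at this
      exact this
    rw [hsnoc] at hsfx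
    have h2 := (snoc_suffix_snoc _ _ _ _).mp hsfx
    have hle : l - 1 ≤ k₀ := hk₀max (l - 1) (by omega) h2.2 (by omega)
    refine ⟨hle, List.suffix_of_suffix_length_le h2.2 hk₀t ?_⟩
    rw [List.length_take, List.length_take]
    omega

-- search caller: from the true state, the step computes pvBest of the extended text
theorem pvStep_best (sp : List String) (fail : List Nat) (t : List String) (c : String)
    (hFail : ∀ j, 1 ≤ j → j < sp.length → fail.getD (j - 1) 0 = pvBorder sp j)
    (hq : pvBest sp t < sp.length) :
    pvStep sp fail c (pvBest sp t) = pvBest sp (t ++ [c]) := by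
  have hmax := pvStep_max sp fail t c (pvBest sp t) hq
    (fun j h1 h2 => hFail j h1 (by omega)) (pvBest_suffix sp t)
  have hintro := pvStepSet_intro sp t c (pvBest sp t) (pvBest sp (t ++ [c]))
    (pvBest_le sp t) (pvBest_suffix sp t)
    (fun l' hl' hsfx _ => le_pvBest sp t hl' hsfx)
    (pvBest_le sp (t ++ [c])) (pvBest_suffix sp (t ++ [c]))
  apply le_antisymm
  · exact le_pvBest sp (t ++ [c]) (hmax.1).1 (hmax.1).2.1
  · exact hmax.2 _ hintro

-- build caller: from the proper-border state, the step computes the next proper border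
theorem pvStep_border (sp : List String) (fail : List Nat) (j : Nat)
    (hj : 1 ≤ j) (hjm : j < sp.length)
    (hFail : ∀ i, 1 ≤ i → i ≤ pvBorder sp j → fail.getD (i - 1) 0 = pvBorder sp i) :
    pvStep sp fail (sp.getD j "") (pvBorder sp j) = pvBorder sp (j + 1) := by
  have hbj : pvBorder sp j ≤ j - 1 := pvBorder_le sp j
  have hsnocj : sp.take (j + 1) = sp.take j ++ [sp.getD j ""] := take_snoc sp j hjm
  have hmax := pvStep_max sp fail (sp.take j) (sp.getD j "") (pvBorder sp j)
    (by omega) hFail (pvBorder_suffix sp j)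
  have hlenj : (sp.take j).length = j := by
    rw [List.length_take]; omega
  have hintro := pvStepSet_intro sp (sp.take j) (sp.getD j "") (pvBorder sp j)
    (pvBorder sp (j + 1)) (by omega) (pvBorder_suffix sp j)
    (fun l' hl' hsfx hl'1 => by
      apply le_pvBorder sp _ hsfx
      have hb1 := pvBorder_le sp (j + 1)
      omega)
    (by have := pvBorder_le sp (j + 1); omega)
    (by rw [← hsnocj]; exact pvBorder_suffix sp (j + 1))
  apply le_antisymm
  · apply le_pvBorder sp
    · rcases (hmax.1).2.2 with h | h
      · omega
      · omega
    · rw [hsnocj]; exact (hmax.1).2.1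
  · exact hmax.2 _ hintro

-- the failure-table loop fills the table with pvBorder values
theorem pvFailLoop_spec (sp : List String) (m : Nat) (hm : m = sp.length) :
    ∀ n j f k, m - j = n → 1 ≤ j → j ≤ m → f.length = j →
    (∀ i, i < j → f.getD i 0 = pvBorder sp (i + 1)) → k = pvBorder sp j →
    ((pvFailLoop sp (PySem.List.pyRange (j : Int) (m : Int) 1) f k).length = m ∧
      ∀ i, i < m → (pvFailLoop sp (PySem.List.pyRange (j : Int) (m : Int) 1) f k).getD i 0 =
        pvBorder sp (i + 1)) := by
  intro n
  induction n with
  | zero =>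
    intro j f k hn hj hjm hfl hft hk
    have hjm' : j = m := by omega
    rw [hjm', PySem.List.pyRange_one_eq_nil le_rfl]
    simp only [pvFailLoop]
    exact ⟨by omega, fun i hi => hft i (by omega)⟩
  | succ n ih =>
    intro j f k hn hj hjm hfl hft hk
    have hjlt : j < m := by omega
    rw [PySem.List.pyRange_one_cons (by exact_mod_cast hjlt)]
    simp only [pvFailLoop]
    rw [PySem.List.pyGetD_natCast]
    have hk' : pvStep sp f (sp.getD j "") k = pvBorder sp (j + 1) := by
      rw [hk]
      apply pvStep_border sp f j hj (by omega)
      intro i hi1 hi2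
      have hb : pvBorder sp j ≤ j - 1 := pvBorder_le sp j
      have : i - 1 < j := by omega
      have := hft (i - 1) this
      rwa [show i - 1 + 1 = i by omega] at this
    rw [hk']
    have harg : ((j : Int) + 1) = ((j + 1 : Nat) : Int) := by push_cast; ring
    rw [harg]
    apply ih (j + 1) (f ++ [pvBorder sp (j + 1)]) (pvBorder sp (j + 1)) (by omega) (by omega)
      (by omega) (by simp [hfl]) ?_ rfl
    intro i hi
    rcases Nat.lt_or_ge i j with h | h
    · rw [List.getD_append f _ 0 i (by omega)]
      exact hft i h
    · have hij : i = j := by omega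
      subst hij
      have : (f ++ [pvBorder sp (i + 1)]).getD f.length 0 = pvBorder sp (i + 1) := by
        simp [List.getD]
      rwa [hfl] at this

-- the search loop returns the first end position of sp, rebased to a start index
theorem pvSearch_spec (sp : List String) (fail : List Nat) (m : Nat) (hm : m = sp.length)
    (hFail : ∀ j, 1 ≤ j → j < m → fail.getD (j - 1) 0 = pvBorder sp j) :
    ∀ rest t q, q = pvBest sp t → q < m →
    pvSearch sp fail m rest (t.length : Int) q =
      (pvEndScan sp t rest).map (fun (e : Nat) => (e : Int) - (m : Int)) := by
  intro rest
  induction rest with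
  | nil => intro t q _ _; rfl
  | cons c rest ih =>
    intro t q hq hqm
    simp only [pvSearch, pvEndScan]
    have hstep : pvStep sp fail c q = pvBest sp (t ++ [c]) := by
      rw [hq]
      exact pvStep_best sp fail t c (fun j h1 h2 => hFail j h1 (by omega)) (by omega)
    rw [hstep]
    by_cases hsfx : sp <:+ t ++ [c]
    · have hle : m ≤ pvBest sp (t ++ [c]) := by
        apply le_pvBest sp (t ++ [c]) (by omega)
        rw [hm, List.take_length]
        exact hsfx
      have hge : pvBest sp (t ++ [c]) ≤ m := hm ▸ pvBest_le sp (t ++ [c])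
      rw [if_pos (show pvBest sp (t ++ [c]) = m by omega), if_pos hsfx]
      show _ = some ((((t.length + 1 : Nat)) : Int) - (m : Int))
      congr 1
      push_cast
      ring
    · have hne : pvBest sp (t ++ [c]) ≠ m := by
        intro h
        apply hsfx
        have := pvBest_suffix sp (t ++ [c])
        rwa [h, hm, List.take_length] at this
      rw [if_neg hne, if_neg hsfx]
      have harg : (t.length : Int) + 1 = ((t ++ [c]).length : Nat) := by
        simp
      rw [harg]
      apply ih (t ++ [c]) _ rfl
      have := hm ▸ pvBest_le sp (t ++ [c])
      omega

-- pvEndScan is the first e with sp a suffix of the first e elements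
theorem pvEndScan_eq_find (sp : List String) :
    ∀ rest t, pvEndScan sp t rest =
      (List.range' (t.length + 1) rest.length).find?
        (fun e => decide (sp <:+ (t ++ rest).take e)) := by
  intro rest
  induction rest with
  | nil => intro t; rfl
  | cons c rest ih =>
    intro t
    simp only [pvEndScan, List.length_cons, List.range'_succ, List.find?]
    have htake : (t ++ (c :: rest)).take (t.length + 1) = t ++ [c] := by
      rw [show (c :: rest) = [c] ++ rest by rfl, ← List.append_assoc, List.take_append]
      simp
    rw [htake]
    by_cases hsfx : sp <:+ t ++ [c]
    · rw [if_pos hsfx, decide_eq_true hsfx]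
    · rw [if_neg hsfx, decide_eq_false hsfx]
      show pvEndScan sp (t ++ [c]) rest = _
      rw [ih (t ++ [c])]
      have h1 : (t ++ [c]).length + 1 = t.length + 1 + 1 := by simp
      have h2 : (t ++ [c]) ++ rest = t ++ (c :: rest) := by simp
      rw [h1, h2]

-- A's loop is find? over the same index list
theorem pvALoop_eq_find (p sp : List String) (l : List Nat) :
    pvALoop p sp (l.map (fun (k : Nat) => (k : Int))) =
      (l.find? (fun i => decide ((p.drop i).take sp.length = sp))).map (fun (i : Nat) => (i : Int)) := by
  induction l with
  | nil => rfl
  | cons k l ih =>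
    rw [List.map_cons]
    simp only [pvALoop, List.find?]
    rw [PySem.List.slice_natCast_add]
    by_cases h : (p.drop k).take sp.length = sp
    · rw [if_pos h, decide_eq_true h]
      rfl
    · rw [if_neg h, decide_eq_false h]
      exact ih

-- end positions and start positions correspond
theorem end_iff_start (p sp : List String) (e : Nat) (he : e ≤ p.length) :
    (sp <:+ p.take e) ↔ sp.length ≤ e ∧ (p.drop (e - sp.length)).take sp.length = sp := by
  have hlen : (p.take e).length = e := by
    rw [List.length_take]; omega
  constructor
  · intro h
    have hm' : sp.length ≤ e := by
      have := h.length_le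
      rwa [hlen] at this
    refine ⟨hm', ?_⟩
    have hd := List.suffix_iff_eq_drop.mp h
    rw [hlen, List.drop_take] at hd
    rw [show e - (e - sp.length) = sp.length by omega] at hd
    exact hd.symm
  · rintro ⟨hm', h2⟩
    rw [List.suffix_iff_eq_drop, hlen, List.drop_take,
      show e - (e - sp.length) = sp.length by omega]
    exact h2.symm

-- the two find?s agree (first end = first start + m)
theorem find_shift (p sp : List String) (hm : 0 < sp.length) (hmn : sp.length ≤ p.length) :
    ((List.range' 1 p.length).find? (fun e => decide (sp <:+ p.take e))).map
        (fun (e : Nat) => (e : Int) - (sp.length : Int)) =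
      ((List.range (p.length - sp.length + 1)).find?
          (fun i => decide ((p.drop i).take sp.length = sp))).map (fun (i : Nat) => (i : Int)) := by
  have hsplit : List.range' 1 p.length =
      List.range' 1 (sp.length - 1) ++ List.range' sp.length (p.length - sp.length + 1) := by
    have h3 := List.range'_append (s := 1) (m := sp.length - 1)
      (n := p.length - sp.length + 1) (step := 1)
    rw [show 1 + 1 * (sp.length - 1) = sp.length by omega,
      show (sp.length - 1) + (p.length - sp.length + 1) = p.length by omega] at h3
    exact h3.symm
  rw [hsplit, List.find?_append]
  have hnone : (List.range' 1 (sp.length - 1)).find? (fun e => decide (sp <:+ p.take e)) = none := by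
    rw [List.find?_eq_none]
    intro e he
    rw [List.mem_range'_1] at he
    simp only [decide_eq_true_eq]
    intro h
    have h1 := h.length_le
    rw [List.length_take] at h1
    omega
  rw [hnone, Option.none_or]
  rw [List.range'_eq_map_range, List.find?_map]
  rw [find?_congr' _ (fun i => decide ((p.drop i).take sp.length = sp)) _ ?_]
  · rw [Option.map_map]
    rcases hfind : (List.range (p.length - sp.length + 1)).find?
        (fun i => decide ((p.drop i).take sp.length = sp)) with _ | i
    · rfl
    · simp only [Option.map_some, Function.comp_apply]
      congr 1
      push_cast
      ring
  · intro i hi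
    rw [List.mem_range] at hi
    simp only [Function.comp_apply]
    congr 1
    rw [end_iff_start p sp (sp.length + i) (by omega)]
    have : sp.length + i - sp.length = i := by omega
    rw [this]
    simp only [eq_iff_iff]
    constructor
    · exact fun h => h.2
    · exact fun h => ⟨by omega, h⟩

-- ===== VERDICT (by name: the statement is the Claim_ definition above) =====
theorem find_subpath_start_py_spec : Claim_equal_find_subpath_start_py := by
  intro path subpath _
  unfold Spec_find_subpath_start_py
  simp only [find_subpath_start_py, find_subpath_start_py_alt, List.map_id']
  by_cases h0 : subpath = [] ∨ path.length < subpath.length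
  · have hB : subpath.length = 0 ∨ path.length < subpath.length := by
      rcases h0 with h | h
      · exact Or.inl (by simp [h])
      · exact Or.inr h
    rw [if_pos (by tauto), if_pos (by tauto)]
  · push Not at h0
    obtain ⟨hne, hle⟩ := h0
    have hm : 0 < subpath.length := List.length_pos_of_ne_nil hne
    rw [if_neg (by push Not; exact ⟨hne, by omega⟩), if_neg (by push Not; omega)]
    -- A side: the scan is find? over range
    have hA : pvALoop path subpath
        (PySem.List.pyRange 0 ((path.length : Int) - (subpath.length : Int) + 1) 1) =
        ((List.range (path.length - subpath.length + 1)).find?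
          (fun i => decide ((path.drop i).take subpath.length = subpath))).map
            (fun (i : Nat) => (i : Int)) := by
      rw [PySem.List.pyRange_one]
      rw [show (((path.length : Int) - (subpath.length : Int) + 1) - 0).toNat =
        path.length - subpath.length + 1 by omega]
      rw [show (fun (k : Nat) => (0 : Int) + (k : Int)) = (fun (k : Nat) => (k : Int)) by
        funext k; ring]
      exact pvALoop_eq_find path subpath _
    rw [hA]
    -- B side: the table is correct, the scan returns the first end position,
    -- and first end positions correspond to first start positions
    have hfail := pvFailLoop_spec subpath subpath.length rfl (subpath.length - 1) 1 [0] 0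
      (by omega) le_rfl (by omega) (by simp) (by intro i hi; interval_cases i; rfl) rfl
    simp only [Nat.cast_one] at hfail
    obtain ⟨-, hftab⟩ := hfail
    have hFailProp : ∀ j, 1 ≤ j → j < subpath.length →
        (pvFailLoop subpath (PySem.List.pyRange 1 (subpath.length : Int) 1) [0] 0).getD (j - 1) 0 =
          pvBorder subpath j := by
      intro j h1j hj
      have := hftab (j - 1) (by omega)
      rwa [show j - 1 + 1 = j by omega] at this
    have hsearch := pvSearch_spec subpath _ subpath.length rfl hFailProp path [] 0
      (pvBest_nil subpath).symm hm
    simp only [List.length_nil, Nat.cast_zero] at hsearch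
    rw [hsearch, pvEndScan_eq_find subpath path []]
    simp only [List.length_nil, List.nil_append, Nat.zero_add]
    rw [← find_shift path subpath hm hle]
    rfl
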